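-- pv_equiv track=rewrite | github.com/alleneinstein0411-cyber/europcr-2026-guide | app-data/parse_sessions.py | detect_track
-- ===== SOURCE A (Python) =====
-- def detect_track(title, room, type_raw, type_parts):
--     """Heuristic track detection based on title/room keywords."""
--     title_lower = title.lower()
--
--     # Structural indicators
--     structural_kw = ['tavi', 'tavr', 'transcatheter aortic', 'transcatheter mitral',
--                      'mitral valve', 'mitral repair', 'tricuspid', 'teer',
--                      'structural heart', 'aortic stenosis', 'valve', 'valvular',
--                      'laa closure', 'left atrial appendage', 'asd', 'pfo',
--                      'paravalvular leak', 'pulmonary valve']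
--
--     # Coronary indicators
--     coronary_kw = ['pci', 'stent', 'coronary', 'bifurcation', 'cto',
--                    'left main', 'drug-coated balloon', 'dcb', 'des',
--                    'atherectomy', 'rotablator', 'lithotripsy', 'ivus', 'oct',
--                    'ffr', 'ifr', 'angioplasty', 'cabg', 'stemi', 'nstemi',
--                    'acs', 'acute coronary', 'myocardial infarction',
--                    'thrombus', 'calcium', 'calcified', 'plaque', 'vulnerable',
--                    'chronic total', 'in-stent', 'restenosis']
--
--     # Heart failure
--     hf_kw = ['heart failure', 'cardiogenic shock', 'impella', 'ecmo',
--              'mechanical circulatory', 'lvad', 'cardiac support']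
--
--     # Hypertension
--     htn_kw = ['hypertension', 'renal denervation', 'blood pressure']
--
--     # Peripheral / PE
--     pe_kw = ['pulmonary embolism', 'thrombectomy in pulmonary', 'pe ']
--     peripheral_kw = ['peripheral', 'lower limb', 'carotid', 'renal artery']
--
--     scores = {
--         'coronary': sum(1 for k in coronary_kw if k in title_lower),
--         'structural': sum(1 for k in structural_kw if k in title_lower),
--         'heartFailure': sum(1 for k in hf_kw if k in title_lower),
--         'hypertension': sum(1 for k in htn_kw if k in title_lower),
--         'pulmonaryEmbolism': sum(1 for k in pe_kw if k in title_lower),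
--         'peripheralInterventions': sum(1 for k in peripheral_kw if k in title_lower),
--     }
--
--     # Room-based hints
--     if 'LEARNING ROOM' in room.upper():
--         if 'CORONARY' in room.upper():
--             scores['coronary'] += 2
--         elif 'STRUCTURAL' in room.upper():
--             scores['structural'] += 2
--
--     # Check for dual track
--     top_scores = sorted(scores.items(), key=lambda x: x[1], reverse=True)
--     if top_scores[0][1] > 0:
--         if top_scores[1][1] > 0 and top_scores[1][1] >= top_scores[0][1] - 1:
--             return f"{top_scores[0][0]},{top_scores[1][0]}"
--         return top_scores[0][0]
--
--     return 'coronary'  # Default for EuroPCR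
-- ===== SOURCE B (Python) =====
-- # Same keyword scoring; replaces sorted() with a single linear top-2 scan (alternative decomposition).
-- _KW = [
--     ('coronary', ['pci', 'stent', 'coronary', 'bifurcation', 'cto',
--                   'left main', 'drug-coated balloon', 'dcb', 'des',
--                   'atherectomy', 'rotablator', 'lithotripsy', 'ivus', 'oct',
--                   'ffr', 'ifr', 'angioplasty', 'cabg', 'stemi', 'nstemi',
--                   'acs', 'acute coronary', 'myocardial infarction',
--                   'thrombus', 'calcium', 'calcified', 'plaque', 'vulnerable',
--                   'chronic total', 'in-stent', 'restenosis']),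
--     ('structural', ['tavi', 'tavr', 'transcatheter aortic', 'transcatheter mitral',
--                     'mitral valve', 'mitral repair', 'tricuspid', 'teer',
--                     'structural heart', 'aortic stenosis', 'valve', 'valvular',
--                     'laa closure', 'left atrial appendage', 'asd', 'pfo',
--                     'paravalvular leak', 'pulmonary valve']),
--     ('heartFailure', ['heart failure', 'cardiogenic shock', 'impella', 'ecmo',
--                       'mechanical circulatory', 'lvad', 'cardiac support']),
--     ('hypertension', ['hypertension', 'renal denervation', 'blood pressure']),
--     ('pulmonaryEmbolism', ['pulmonary embolism', 'thrombectomy in pulmonary', 'pe ']),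
--     ('peripheralInterventions', ['peripheral', 'lower limb', 'carotid', 'renal artery']),
-- ]
--
--
-- def _score(name, kws, t, u):
--     s = sum(1 for k in kws if k in t)
--     if 'LEARNING ROOM' in u:
--         if name == 'coronary' and 'CORONARY' in u:
--             s += 2
--         elif name == 'structural' and 'STRUCTURAL' in u and 'CORONARY' not in u:
--             s += 2
--     return s
--
--
-- def detect_track(title, room, type_raw, type_parts):
--     t = title.lower()
--     u = room.upper()
--     entries = [(name, _score(name, kws, t, u)) for name, kws in _KW]
--     best = None
--     second = None
--     for e in entries:
--         if best is None or e[1] > best[1]: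
--             best, second = e, best
--         elif second is None or e[1] > second[1]:
--             second = e
--     if best[1] > 0:
--         if second[1] > 0 and second[1] >= best[1] - 1:
--             return best[0] + ',' + second[0]
--         return best[0]
--     return 'coronary'
-- ===== Notes on version B (the rewrite author's own statement) =====
-- stated objective: alternative
-- what changed: B keeps the identical keyword scoring (with the room-based +2 adjustments) but replaces A's sorted(scores.items(), reverse=True) plus indexing by a single linear top-2 scan over the entries in insertion order, using strict comparisons so stable reverse-sort tie-breaking is preserved.
import Mathlib
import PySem

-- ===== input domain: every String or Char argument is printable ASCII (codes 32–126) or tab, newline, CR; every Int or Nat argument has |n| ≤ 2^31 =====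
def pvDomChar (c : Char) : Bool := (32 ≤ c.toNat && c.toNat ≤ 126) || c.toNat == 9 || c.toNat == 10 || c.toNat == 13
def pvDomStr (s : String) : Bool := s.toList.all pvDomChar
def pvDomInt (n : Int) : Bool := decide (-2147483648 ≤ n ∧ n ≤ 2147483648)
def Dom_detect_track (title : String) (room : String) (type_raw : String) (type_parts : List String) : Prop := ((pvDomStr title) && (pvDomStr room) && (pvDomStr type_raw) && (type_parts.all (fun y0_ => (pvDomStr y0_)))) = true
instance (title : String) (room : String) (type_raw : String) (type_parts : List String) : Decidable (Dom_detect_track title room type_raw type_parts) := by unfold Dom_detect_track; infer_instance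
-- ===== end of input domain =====

-- B replaces A's sorted()-then-index selection by a single linear top-2 scan over the same scores; objective: alternative (same keyword scoring, different selection algorithm).

-- ===== PORT A =====
def dtCoronaryKw : List String :=
  ["pci", "stent", "coronary", "bifurcation", "cto",
   "left main", "drug-coated balloon", "dcb", "des",
   "atherectomy", "rotablator", "lithotripsy", "ivus", "oct",
   "ffr", "ifr", "angioplasty", "cabg", "stemi", "nstemi",
   "acs", "acute coronary", "myocardial infarction",
   "thrombus", "calcium", "calcified", "plaque", "vulnerable",
   "chronic total", "in-stent", "restenosis"]

def dtStructuralKw : List String :=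
  ["tavi", "tavr", "transcatheter aortic", "transcatheter mitral",
   "mitral valve", "mitral repair", "tricuspid", "teer",
   "structural heart", "aortic stenosis", "valve", "valvular",
   "laa closure", "left atrial appendage", "asd", "pfo",
   "paravalvular leak", "pulmonary valve"]

def dtHfKw : List String :=
  ["heart failure", "cardiogenic shock", "impella", "ecmo",
   "mechanical circulatory", "lvad", "cardiac support"]

def dtHtnKw : List String := ["hypertension", "renal denervation", "blood pressure"]

def dtPeKw : List String := ["pulmonary embolism", "thrombectomy in pulmonary", "pe "]

def dtPeriphKw : List String := ["peripheral", "lower limb", "carotid", "renal artery"]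

-- sum(1 for k in kws if k in t)  (a 0/1-sum is List.countP)
def dtCount (kws : List String) (t : String) : Int :=
  ((kws.countP (fun k => PySem.Str.isIn k t) : Nat) : Int)

-- final selection of A: index the reverse-sorted items
def dtPickA (top_scores : List (String × Int)) : String :=
  match top_scores with
  | (n0, s0) :: (n1, s1) :: _ =>
      if 0 < s0 then
        if 0 < s1 ∧ s0 - 1 ≤ s1 then n0 ++ "," ++ n1 else n0
      else "coronary"
  | _ => "coronary"  -- unreachable: the dict always has six entries

def detect_track (title : String) (room : String) (type_raw : String) (type_parts : List String) : String :=
  let title_lower := PySem.Str.lower title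
  let scores : PySem.Dict String Int := PySem.Dict.ofList
    [("coronary", dtCount dtCoronaryKw title_lower),
     ("structural", dtCount dtStructuralKw title_lower),
     ("heartFailure", dtCount dtHfKw title_lower),
     ("hypertension", dtCount dtHtnKw title_lower),
     ("pulmonaryEmbolism", dtCount dtPeKw title_lower),
     ("peripheralInterventions", dtCount dtPeriphKw title_lower)]
  -- room-based hints (scores['k'] += 2; the key is always present)
  let scores :=
    if PySem.Str.isIn "LEARNING ROOM" (PySem.Str.upper room) then
      if PySem.Str.isIn "CORONARY" (PySem.Str.upper room) then
        scores.modify "coronary" 0 (· + 2)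
      else if PySem.Str.isIn "STRUCTURAL" (PySem.Str.upper room) then
        scores.modify "structural" 0 (· + 2)
      else scores
    else scores
  let top_scores := PySem.List.sorted scores.items (fun x => x.2) true
  dtPickA top_scores

-- ===== PORT B =====
def dtKW : List (String × List String) :=
  [("coronary", dtCoronaryKw),
   ("structural", dtStructuralKw),
   ("heartFailure", dtHfKw),
   ("hypertension", dtHtnKw),
   ("pulmonaryEmbolism", dtPeKw),
   ("peripheralInterventions", dtPeriphKw)]

-- _score in Source B
def dtScoreB (name : String) (kws : List String) (t : String) (u : String) : Int :=
  let s := ((kws.countP (fun k => PySem.Str.isIn k t) : Nat) : Int)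
  if PySem.Str.isIn "LEARNING ROOM" u then
    if name == "coronary" && PySem.Str.isIn "CORONARY" u then s + 2
    else if name == "structural" && PySem.Str.isIn "STRUCTURAL" u && !(PySem.Str.isIn "CORONARY" u) then s + 2
    else s
  else s

-- one step of Source B's linear top-2 scan
def dtStep (st : Option (String × Int) × Option (String × Int)) (e : String × Int) :
    Option (String × Int) × Option (String × Int) :=
  match st with
  | (none, _) => (some e, none)
  | (some b, sec) =>
      if b.2 < e.2 then (some e, some b)
      else
        match sec with
        | none => (some b, some e)
        | some c => if c.2 < e.2 then (some b, some e) else (some b, some c)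

-- final selection of B: read the two scan slots
def dtPickB (st : Option (String × Int) × Option (String × Int)) : String :=
  match st with
  | (some b, some c) =>
      if 0 < b.2 then
        if 0 < c.2 ∧ b.2 - 1 ≤ c.2 then b.1 ++ "," ++ c.1 else b.1
      else "coronary"
  | _ => "coronary"  -- unreachable: entries always has six elements

def detect_track_alt (title : String) (room : String) (type_raw : String) (type_parts : List String) : String :=
  let t := PySem.Str.lower title
  let u := PySem.Str.upper room
  let entries := dtKW.map (fun p => (p.1, dtScoreB p.1 p.2 t u))
  dtPickB (entries.foldl dtStep (none, none))

-- ===== PRECONDITION & SPEC =====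
def Spec_detect_track (title : String) (room : String) (type_raw : String) (type_parts : List String) (out : String) : Prop := out = detect_track_alt title room type_raw type_parts
instance (title : String) (room : String) (type_raw : String) (type_parts : List String) (out : String) : Decidable (Spec_detect_track title room type_raw type_parts out) := by unfold Spec_detect_track; infer_instance

-- ===== CLAIM (what is proved, stated in full; the proofs are below) =====
def Claim_equal_detect_track : Prop := ∀ (title : String) (room : String) (type_raw : String) (type_parts : List String), Dom_detect_track title room type_raw type_parts → Spec_detect_track title room type_raw type_parts (detect_track title room type_raw type_parts)

-- ===== LEMMAS AND PROOFS =====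

-- one scan step equals "first two elements after one stable reverse insertion"
lemma dtStep_insertBy (acc : List (String × Int)) (x : String × Int) :
    dtStep (acc[0]?, acc[1]?) x =
      ((PySem.List.insertBy (fun a b => decide (b.2 < a.2)) x acc)[0]?,
       (PySem.List.insertBy (fun a b => decide (b.2 < a.2)) x acc)[1]?) := by
  match acc with
  | [] => rfl
  | [a] =>
      by_cases h : a.2 < x.2 <;> simp [dtStep, PySem.List.insertBy, h]
  | a :: b :: t =>
      by_cases h1 : a.2 < x.2
      · simp [dtStep, PySem.List.insertBy, h1]
      · by_cases h2 : b.2 < x.2 <;> simp [dtStep, PySem.List.insertBy, h1, h2]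

-- the whole scan equals the first two elements of the insertion-sort fold
lemma dtScan_foldl (l acc : List (String × Int)) :
    l.foldl dtStep (acc[0]?, acc[1]?) =
      ((l.foldl (fun a x => PySem.List.insertBy (fun a b => decide (b.2 < a.2)) x a) acc)[0]?,
       (l.foldl (fun a x => PySem.List.insertBy (fun a b => decide (b.2 < a.2)) x a) acc)[1]?) := by
  induction l generalizing acc with
  | nil => rfl
  | cons x l ih =>
      simp only [List.foldl_cons]
      rw [dtStep_insertBy]
      exact ih _

-- the scan returns the first two elements of the reverse-stable sort
lemma dtScan_sorted (l : List (String × Int)) :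
    l.foldl dtStep (none, none) =
      ((PySem.List.sorted l (fun x => x.2) true)[0]?,
       (PySem.List.sorted l (fun x => x.2) true)[1]?) := by
  rw [PySem.List.sorted_rev_eq_foldl_insertBy]
  exact dtScan_foldl l []

-- the six-key score dict, before and after each room adjustment, as an explicit list
lemma dtItems_base (a b c d e f : Int) :
    (PySem.Dict.ofList
      [("coronary", a), ("structural", b), ("heartFailure", c), ("hypertension", d),
       ("pulmonaryEmbolism", e), ("peripheralInterventions", f)] : PySem.Dict String Int).items
    = [("coronary", a), ("structural", b), ("heartFailure", c), ("hypertension", d),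
       ("pulmonaryEmbolism", e), ("peripheralInterventions", f)] := rfl

lemma dtItems_cor (a b c d e f : Int) :
    ((PySem.Dict.ofList
      [("coronary", a), ("structural", b), ("heartFailure", c), ("hypertension", d),
       ("pulmonaryEmbolism", e), ("peripheralInterventions", f)] : PySem.Dict String Int).modify
        "coronary" 0 (· + 2)).items
    = [("coronary", a + 2), ("structural", b), ("heartFailure", c), ("hypertension", d),
       ("pulmonaryEmbolism", e), ("peripheralInterventions", f)] := rfl

lemma dtItems_str (a b c d e f : Int) :
    ((PySem.Dict.ofList
      [("coronary", a), ("structural", b), ("heartFailure", c), ("hypertension", d),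
       ("pulmonaryEmbolism", e), ("peripheralInterventions", f)] : PySem.Dict String Int).modify
        "structural" 0 (· + 2)).items
    = [("coronary", a), ("structural", b + 2), ("heartFailure", c), ("hypertension", d),
       ("pulmonaryEmbolism", e), ("peripheralInterventions", f)] := rfl

-- both final selections coincide on any six-element score list
lemma dtFinal (L : List (String × Int)) (h : L.length = 6) :
    dtPickA (PySem.List.sorted L (fun x => x.2) true) = dtPickB (L.foldl dtStep (none, none)) := by
  rw [dtScan_sorted]
  have hl : (PySem.List.sorted L (fun x => x.2) true).length = L.length :=
    PySem.List.length_sorted L (fun x => x.2) true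
  cases hS : PySem.List.sorted L (fun x => x.2) true with
  | nil => rw [hS, h] at hl; exact absurd hl (by decide)
  | cons a T =>
    cases T with
    | nil => rw [hS, h] at hl; exact absurd hl (by simp)
    | cons b R => rfl

-- ===== VERDICT (by name: the statement is the Claim_ definition above) =====
theorem detect_track_spec : Claim_equal_detect_track := by
  intro title room type_raw type_parts _
  unfold Spec_detect_track detect_track detect_track_alt
  by_cases hL : PySem.Str.isIn "LEARNING ROOM" (PySem.Str.upper room)
  all_goals by_cases hC : PySem.Str.isIn "CORONARY" (PySem.Str.upper room)
  all_goals by_cases hS : PySem.Str.isIn "STRUCTURAL" (PySem.Str.upper room)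
  all_goals
    simp only [hL, hC, hS, if_true, if_false, String.reduceBEq, beq_self_eq_true,
      Bool.and_false, Bool.and_true, Bool.not_true,
      Bool.not_false, Bool.false_eq_true, dtKW, dtScoreB, dtCount, List.map,
      dtItems_base, dtItems_cor, dtItems_str]
  all_goals exact dtFinal _ rfl
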